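-- pv_equiv track=rewrite | github.com/nguyen1920/eth-common-whales | main copy.py | remove_periods
-- ===== SOURCE A (Python) =====
-- def remove_periods(string):
--     string = str(string)
--     i=0
--     string1 = ""
--     firstPeriod = False
--     secondPeriod = False
--     while(i<len(string) and secondPeriod == False):
--         if(string[i].isdigit() and secondPeriod == False):
--             string1 = string1 + string[i]
--         elif(string[i] == "." and firstPeriod == False):
--             string1 = string1 + string[i]
--             firstPeriod = True
--         elif(string[i].isdigit() == False and firstPeriod == True):
--             secondPeriod == True
--         i=i+1
--
--     if(string1[-1] == '.'):
--         string1 = string1 + "00"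
--
--     return string1
-- ===== SOURCE B (Python) =====
-- def remove_periods(string):
--     string = str(string)
--     before, sep, after = string.partition('.')
--     result = (''.join(c for c in before if c.isdigit()) + sep
--               + ''.join(c for c in after if c.isdigit()))
--     if result[-1] == '.':
--         result += '00'
--     return result
-- ===== Notes on version B (the rewrite author's own statement) =====
-- stated objective: simpler
-- what changed: Replaced the stateful firstPeriod/secondPeriod flag loop by a str.partition split on the period separator followed by two digit-filter comprehensions; the dead secondPeriod machinery disappears.
import Mathlib
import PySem

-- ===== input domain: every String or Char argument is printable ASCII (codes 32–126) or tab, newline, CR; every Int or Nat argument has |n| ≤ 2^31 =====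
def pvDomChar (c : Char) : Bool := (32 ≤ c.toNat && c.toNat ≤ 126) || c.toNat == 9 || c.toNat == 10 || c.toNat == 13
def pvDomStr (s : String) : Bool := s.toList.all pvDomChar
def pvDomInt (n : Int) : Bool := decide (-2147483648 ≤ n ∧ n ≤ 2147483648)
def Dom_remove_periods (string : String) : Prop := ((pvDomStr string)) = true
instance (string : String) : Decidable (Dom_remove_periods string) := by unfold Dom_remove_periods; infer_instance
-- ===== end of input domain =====

-- B replaces A's firstPeriod/secondPeriod flag loop by a partition('.') split with two digit filters (objective: simpler).


-- ===== PORT A =====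
-- the while loop of A over the characters, carrying (string1, firstPeriod, secondPeriod);
-- the 'secondPeriod == True' line of A is a comparison, hence a no-op branch here too
def pvLoopA : List Char → List Char → Bool → Bool → List Char
  | [], s1, _, _ => s1
  | c :: cs, s1, fp, sp =>
    if sp = true then s1
    else if PySem.Chars.isdigit c && !sp then pvLoopA cs (s1 ++ [c]) fp sp
    else if c = '.' && !fp then pvLoopA cs (s1 ++ [c]) true sp
    else if !(PySem.Chars.isdigit c) && fp then pvLoopA cs s1 fp sp
    else pvLoopA cs s1 fp sp

def remove_periods (string : String) : String :=
  let s1 := pvLoopA string.toList [] false false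
  let s1 := if PySem.List.pyGet? s1 (-1) = some '.' then s1 ++ ['0', '0'] else s1
  String.ofList s1

-- ===== PORT B =====
-- str.partition('.') ported by hand (PySem has no partition): none = separator absent
def pvPartDot : List Char → Option (List Char × List Char)
  | [] => none
  | c :: cs =>
    if c = '.' then some ([], cs)
    else (pvPartDot cs).map (fun p => (c :: p.1, p.2))

def remove_periods_alt (string : String) : String :=
  let cs := string.toList
  let result :=
    match pvPartDot cs with
    | none => cs.filter PySem.Chars.isdigit
    | some (l, r) => l.filter PySem.Chars.isdigit ++ '.' :: r.filter PySem.Chars.isdigit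
  let result := if PySem.List.pyGet? result (-1) = some '.' then result ++ ['0', '0'] else result
  String.ofList result

-- ===== PRECONDITION & SPEC =====
-- Pre_ excludes exactly the strings containing neither a digit nor a period, on which A (and B) raise IndexError at string1[-1]
def Pre_remove_periods (string : String) : Prop :=
  (string.toList.any (fun c => PySem.Chars.isdigit c || c = '.')) = true
instance (string : String) : Decidable (Pre_remove_periods string) := by unfold Pre_remove_periods; infer_instance
def pvWitness_remove_periods : String := "12.34"

def Spec_remove_periods (string : String) (out : String) : Prop := out = remove_periods_alt string
instance (string : String) (out : String) : Decidable (Spec_remove_periods string out) := by unfold Spec_remove_periods; infer_instance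

-- ===== CLAIM (what is proved, stated in full; the proofs are below) =====
def Claim_equal_remove_periods : Prop := ∀ (string : String), Dom_remove_periods string → Pre_remove_periods string → Spec_remove_periods string (remove_periods string)

-- ===== LEMMAS AND PROOFS =====

-- after the first period was seen, A's loop just keeps the digits
theorem pvLoopA_after_dot (cs : List Char) (acc : List Char) :
    pvLoopA cs acc true false = acc ++ cs.filter PySem.Chars.isdigit := by
  induction cs generalizing acc with
  | nil => simp [pvLoopA]
  | cons c cs ih =>
    by_cases hd : PySem.Chars.isdigit c
    · simp [pvLoopA, hd, ih, List.filter]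
    · simp [pvLoopA, hd, ih, List.filter]

-- A's loop from the initial state computes B's partition-and-filter result
theorem pvLoopA_eq (cs : List Char) (acc : List Char) :
    pvLoopA cs acc false false =
      acc ++ (match pvPartDot cs with
        | none => cs.filter PySem.Chars.isdigit
        | some (l, r) => l.filter PySem.Chars.isdigit ++ '.' :: r.filter PySem.Chars.isdigit) := by
  induction cs generalizing acc with
  | nil => simp [pvLoopA, pvPartDot]
  | cons c cs ih =>
    by_cases hdot : c = '.'
    · subst hdot
      simp [pvLoopA, pvPartDot, PySem.Chars.isdigit, pvLoopA_after_dot]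
    · by_cases hd : PySem.Chars.isdigit c
      · have hne : ¬ ('.' : Char).isDigit := by decide
        simp only [pvLoopA, hd, hdot]
        rw [ih]
        cases h : pvPartDot cs with
        | none => simp [pvPartDot, hdot, h, List.filter, hd]
        | some p => cases p with
          | mk l r => simp [pvPartDot, hdot, h, List.filter, hd]
      · simp only [pvLoopA, hd, hdot]
        cases h : pvPartDot cs with
        | none => simp [pvPartDot, hdot, h, List.filter, hd, ih, Bool.and_false]
        | some p => cases p with
          | mk l r => simp [pvPartDot, hdot, h, List.filter, hd, ih, Bool.and_false]

-- ===== VERDICT (by name: the statement is the Claim_ definition above) =====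
theorem remove_periods_spec : Claim_equal_remove_periods := by
  intro s _ _
  unfold Spec_remove_periods remove_periods remove_periods_alt
  rw [pvLoopA_eq]
  simp
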